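-- pv_equiv track=rewrite | github.com/kgs/aoc2022 | day15/solve.py | get_free_x_in_row
-- ===== SOURCE A (Python) =====
-- Sensor = tuple[int, int, int]
--
-- def generate_coords_in_row(sensors: list[Sensor], y: int) -> list[tuple[int, int]]:
--     coords = []
--     for s in sensors:
--         xs, ys, d = s
--         dy = abs(ys - y)
--         if dy <= d:
--             left_x = xs + dy - d
--             right_x = d - dy + xs
--             coords += [(left_x, 0), (right_x, 1)]
--     coords.sort()
--     return coords
--
-- def get_free_x_in_row(sensors: list[Sensor], y: int, max_x: int) -> int | None:
--     coords = generate_coords_in_row(sensors, y)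
--     overlapping = 0
--     if len(coords) > 0:
--         if coords[0][0] - 1 >= 0:
--             return coords[0][0] - 1
--     for c in coords:
--         if c[1] == 0:
--             # start of interval
--             overlapping += 1
--         elif c[1] == 1:
--             # end of interval
--             overlapping -= 1
--             if overlapping == 0:
--                 # we have candidate
--                 if c[0] + 1 <= max_x:
--                     return c[0] + 1
--     return None
-- ===== SOURCE B (Python) =====
-- def get_free_x_in_row(sensors, y, max_x):
--     intervals = []
--     for xs, ys, d in sensors:
--         dy = abs(ys - y)
--         if dy <= d:
--             intervals.append((xs + dy - d, d - dy + xs))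
--     intervals.sort()
--     if not intervals:
--         return None
--     (cl, ce), rest = intervals[0], intervals[1:]
--     if cl - 1 >= 0:
--         return cl - 1
--     # merge sorted intervals into disjoint clusters (merge on overlap, not adjacency)
--     clusters = []
--     for l, r in rest:
--         if l <= ce:
--             ce = max(ce, r)
--         else:
--             clusters.append((cl, ce))
--             cl, ce = l, r
--     clusters.append((cl, ce))
--     # first gap after a cluster that fits under max_x
--     for _, e in clusters:
--         if e + 1 <= max_x:
--             return e + 1
--     return None
-- ===== Notes on version B (the rewrite author's own statement) =====
-- stated objective: alternative
-- what changed: Replaces the sorted (x,tag) event sweep with an overlap counter by sorting the sensor intervals themselves, merging them into disjoint clusters (merge when next.left <= current_end), and returning the first admissible gap at a cluster boundary.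
import Mathlib
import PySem

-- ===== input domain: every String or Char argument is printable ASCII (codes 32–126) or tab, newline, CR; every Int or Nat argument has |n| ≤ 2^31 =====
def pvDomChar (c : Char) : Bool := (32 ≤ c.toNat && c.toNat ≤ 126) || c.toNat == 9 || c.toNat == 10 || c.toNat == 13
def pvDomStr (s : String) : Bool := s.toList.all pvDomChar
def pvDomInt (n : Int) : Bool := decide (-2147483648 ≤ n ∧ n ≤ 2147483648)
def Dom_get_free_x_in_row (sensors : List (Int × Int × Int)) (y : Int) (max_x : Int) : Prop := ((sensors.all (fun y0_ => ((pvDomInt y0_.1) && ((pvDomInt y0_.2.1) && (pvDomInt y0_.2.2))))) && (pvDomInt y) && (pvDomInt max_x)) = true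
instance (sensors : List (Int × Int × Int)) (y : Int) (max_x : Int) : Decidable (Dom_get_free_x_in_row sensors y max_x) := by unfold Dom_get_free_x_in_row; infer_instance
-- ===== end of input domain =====

-- B replaces A's sorted (x,tag) event sweep with an overlap counter by sorting the
-- sensor intervals, merging overlapping ones into clusters and scanning cluster gaps
-- (alternative algorithm of the same cost; same return value everywhere).

-- ===== PORT A =====
-- generate_coords_in_row: the (x, tag) event list, sorted (Python tuple sort = lex)
def pvGenCoords (sensors : List (Int × Int × Int)) (y : Int) : List (Int × Int) :=
  PySem.List.sorted2
    (sensors.foldl (fun coords s =>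
        let dy := |s.2.1 - y|
        if dy ≤ s.2.2 then
          coords ++ [(s.1 + dy - s.2.2, 0), (s.2.2 - dy + s.1, 1)]
        else coords) [])
    (fun c => c.1) (fun c => c.2)

-- A's 'for c in coords' loop with the overlap counter and early returns
def pvScanA : List (Int × Int) → Int → Int → Option Int
  | [], _, _ => none
  | c :: rest, overlapping, max_x =>
    if c.2 = 0 then pvScanA rest (overlapping + 1) max_x
    else if c.2 = 1 then
      if overlapping - 1 = 0 then
        (if c.1 + 1 ≤ max_x then some (c.1 + 1) else pvScanA rest (overlapping - 1) max_x)
      else pvScanA rest (overlapping - 1) max_x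
    else pvScanA rest overlapping max_x

def get_free_x_in_row (sensors : List (Int × Int × Int)) (y : Int) (max_x : Int) : Option Int :=
  let coords := pvGenCoords sensors y
  match coords with
  | [] => pvScanA coords 0 max_x
  | c0 :: _ => if c0.1 - 1 ≥ 0 then some (c0.1 - 1) else pvScanA coords 0 max_x

-- ===== PORT B =====
-- Source B: the sorted interval list [(left, right)] of sensors reaching row y
def pvIntervals (sensors : List (Int × Int × Int)) (y : Int) : List (Int × Int) :=
  PySem.List.sorted2
    (sensors.foldl (fun intervals s =>
        let dy := |s.2.1 - y|
        if dy ≤ s.2.2 then intervals ++ [(s.1 + dy - s.2.2, s.2.2 - dy + s.1)]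
        else intervals) [])
    (fun p => p.1) (fun p => p.2)

-- Source B: 'for _, e in clusters: if e + 1 <= max_x: return e + 1'
def pvFirstGap : List (Int × Int) → Int → Option Int
  | [], _ => none
  | c :: rest, max_x => if c.2 + 1 ≤ max_x then some (c.2 + 1) else pvFirstGap rest max_x

def get_free_x_in_row_alt (sensors : List (Int × Int × Int)) (y : Int) (max_x : Int) : Option Int :=
  match pvIntervals sensors y with
  | [] => none
  | c0 :: rest =>
    if c0.1 - 1 ≥ 0 then some (c0.1 - 1)
    else
      -- Source B's merge loop: state = (clusters, cl, ce), final append of the open cluster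
      let st := rest.foldl (fun st p =>
          if p.1 ≤ st.2.2 then (st.1, st.2.1, max st.2.2 p.2)
          else (st.1 ++ [(st.2.1, st.2.2)], p.1, p.2)) (([] : List (Int × Int)), c0.1, c0.2)
      pvFirstGap (st.1 ++ [(st.2.1, st.2.2)]) max_x

-- ===== PRECONDITION & SPEC =====
def Spec_get_free_x_in_row (sensors : List (Int × Int × Int)) (y : Int) (max_x : Int) (out : Option Int) : Prop := out = get_free_x_in_row_alt sensors y max_x
instance (sensors : List (Int × Int × Int)) (y : Int) (max_x : Int) (out : Option Int) : Decidable (Spec_get_free_x_in_row sensors y max_x out) := by unfold Spec_get_free_x_in_row; infer_instance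

-- ===== CLAIM (what is proved, stated in full; the proofs are below) =====
def Claim_equal_get_free_x_in_row : Prop := ∀ (sensors : List (Int × Int × Int)) (y : Int) (max_x : Int), Dom_get_free_x_in_row sensors y max_x → Spec_get_free_x_in_row sensors y max_x (get_free_x_in_row sensors y max_x)

-- ===== LEMMAS AND PROOFS =====

-- ---- sorting theory for Python's tuple sort on Int × Int ----
def Le2 (a b : Int × Int) : Prop := a.1 < b.1 ∨ (a.1 = b.1 ∧ a.2 ≤ b.2)

def pvBefore (a b : Int × Int) : Bool :=
  decide (a.1 < b.1) || (!decide (b.1 < a.1) && decide (a.2 < b.2))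

lemma sorted2_eq_foldl (xs : List (Int × Int)) :
    PySem.List.sorted2 xs (fun p => p.1) (fun p => p.2) false
      = xs.foldl (fun acc x => PySem.List.insertBy pvBefore x acc) [] := rfl

lemma before_iff (a b : Int × Int) : pvBefore a b = true ↔ ¬ Le2 b a := by
  simp [pvBefore, Le2]; omega

lemma le2_total (a b : Int × Int) : Le2 a b ∨ Le2 b a := by unfold Le2; omega

lemma le2_trans {a b c : Int × Int} : Le2 a b → Le2 b c → Le2 a c := by unfold Le2; omega

lemma insertBy_pairwise {x : Int × Int} {ys : List (Int × Int)}
    (h : ys.Pairwise Le2) : (PySem.List.insertBy pvBefore x ys).Pairwise Le2 := by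
  induction ys with
  | nil => simp [PySem.List.insertBy]
  | cons y ys ih =>
    rcases h with _ | ⟨hy, hys⟩
    by_cases hb : pvBefore x y = true
    · have hxy : Le2 x y := by
        rcases le2_total x y with h1 | h1
        · exact h1
        · exact absurd h1 ((before_iff x y).mp hb)
      -- x before y: x :: y :: ys
      have : PySem.List.insertBy pvBefore x (y :: ys) = x :: y :: ys := by
        simp [PySem.List.insertBy, hb]
      rw [this]
      exact List.Pairwise.cons
        (by intro z hz
            rw [List.mem_cons] at hz
            rcases hz with rfl | hz
            · exact hxy
            · exact le2_trans hxy (hy _ hz))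
        (List.Pairwise.cons hy hys)
    · have : PySem.List.insertBy pvBefore x (y :: ys) = y :: PySem.List.insertBy pvBefore x ys := by
        simp [PySem.List.insertBy, hb]
      rw [this]
      refine List.Pairwise.cons ?_ (ih hys)
      intro z hz
      rcases (PySem.List.mem_insertBy pvBefore x z ys).mp hz with hzx | hz
      · subst hzx
        by_contra hc
        exact hb ((before_iff z y).mpr hc)
      · exact hy _ hz

lemma foldl_insertBy_pairwise (xs acc : List (Int × Int))
    (h : acc.Pairwise Le2) :
    (xs.foldl (fun acc x => PySem.List.insertBy pvBefore x acc) acc).Pairwise Le2 := by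
  induction xs generalizing acc with
  | nil => exact h
  | cons x xs ih => exact ih _ (insertBy_pairwise h)

lemma sorted2_pairwise' (xs : List (Int × Int)) :
    (PySem.List.sorted2 xs (fun p => p.1) (fun p => p.2) false).Pairwise Le2 := by
  rw [sorted2_eq_foldl]; exact foldl_insertBy_pairwise xs [] List.Pairwise.nil

lemma le2_antisymm {a b : Int × Int} (h1 : Le2 a b) (h2 : Le2 b a) : a = b := by
  rcases a with ⟨a1, a2⟩; rcases b with ⟨b1, b2⟩
  unfold Le2 at h1 h2; simp at *; omega

lemma sorted2_unique {xs ys : List (Int × Int)}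
    (hp : ys.Perm xs) (hs : ys.Pairwise Le2) :
    PySem.List.sorted2 xs (fun p => p.1) (fun p => p.2) false = ys :=
  List.Perm.eq_of_pairwise (fun _ _ _ _ h1 h2 => le2_antisymm h1 h2)
    (sorted2_pairwise' xs) hs ((PySem.List.sorted2_perm xs _ _ false).trans hp.symm)

-- ---- events, counter deltas, candidate ends ----
def pvEvs (S : List (Int × Int)) : List (Int × Int) :=
  S.flatMap (fun p => [(p.1, 0), (p.2, 1)])

def pvDelta : List (Int × Int) → Int
  | [] => 0
  | e :: es => (if e.2 = 0 then 1 else if e.2 = 1 then -1 else 0) + pvDelta es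

-- the x-coordinates of end events at which A's counter hits 0 (its gap candidates)
def pvCand : List (Int × Int) → Int → List Int
  | [], _ => []
  | e :: es, ov =>
    if e.2 = 0 then pvCand es (ov + 1)
    else if e.2 = 1 then
      (if ov - 1 = 0 then e.1 :: pvCand es (ov - 1) else pvCand es (ov - 1))
    else pvCand es ov

-- recursive form of Source B's merge loop
def pvMergeRec : List (Int × Int) → Int → Int → List (Int × Int)
  | [], cl, ce => [(cl, ce)]
  | p :: rest, cl, ce =>
    if p.1 ≤ ce then pvMergeRec rest cl (max ce p.2)
    else (cl, ce) :: pvMergeRec rest p.1 p.2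

-- first-cluster split: (intervals merged into the current cluster, its end, the rest)
def pvSplitCl : List (Int × Int) → Int → List (Int × Int) × Int × List (Int × Int)
  | [], ce => ([], ce, [])
  | p :: rest, ce =>
    if p.1 ≤ ce then
      let t := pvSplitCl rest (max ce p.2)
      (p :: t.1, t.2.1, t.2.2)
    else ([], ce, p :: rest)

lemma evs_append (S T : List (Int × Int)) : pvEvs (S ++ T) = pvEvs S ++ pvEvs T := by
  simp [pvEvs]

lemma mem_evs_iff {e : Int × Int} {C : List (Int × Int)} :
    e ∈ pvEvs C ↔ ∃ p ∈ C, e = (p.1, 0) ∨ e = (p.2, 1) := by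
  simp [pvEvs]

lemma delta_eq_countP (P : List (Int × Int)) :
    pvDelta P = (P.countP (fun e => e.2 == 0) : Int) - (P.countP (fun e => e.2 == 1) : Int) := by
  induction P with
  | nil => simp [pvDelta]
  | cons e es ih =>
    by_cases h0 : e.2 = 0
    · simp [pvDelta, List.countP_cons, h0, ih]; omega
    · by_cases h1 : e.2 = 1
      · simp [pvDelta, List.countP_cons, h0, h1, ih]; omega
      · simp [pvDelta, List.countP_cons, h0, h1, ih]

lemma delta_append (P Q : List (Int × Int)) : pvDelta (P ++ Q) = pvDelta P + pvDelta Q := by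
  induction P with
  | nil => simp [pvDelta]
  | cons e es ih => simp [pvDelta, ih]; ring

lemma delta_perm {P Q : List (Int × Int)} (h : P.Perm Q) : pvDelta P = pvDelta Q := by
  rw [delta_eq_countP, delta_eq_countP, h.countP_eq, h.countP_eq]

lemma countP_evs (f : Int × Int → Bool) (C : List (Int × Int)) :
    (pvEvs C).countP f = C.countP (fun p => f (p.1, 0)) + C.countP (fun p => f (p.2, 1)) := by
  induction C with
  | nil => simp [pvEvs]
  | cons p C ih =>
    simp only [pvEvs, List.flatMap_cons, List.countP_append, List.countP_cons, List.countP_nil] at *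
    omega

lemma delta_evs (C : List (Int × Int)) : pvDelta (pvEvs C) = 0 := by
  rw [delta_eq_countP, countP_evs, countP_evs]; simp

lemma cand_congr (Q : List (Int × Int)) {a b : Int} (h : a = b) : pvCand Q a = pvCand Q b := by rw [h]

lemma cand_append (P Q : List (Int × Int)) (ov : Int) :
    pvCand (P ++ Q) ov = pvCand P ov ++ pvCand Q (ov + pvDelta P) := by
  induction P generalizing ov with
  | nil => simp [pvCand, pvDelta]
  | cons e es ih =>
    by_cases h0 : e.2 = 0
    · simp [pvCand, pvDelta, h0, ih]
      exact cand_congr Q (by ring)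
    · by_cases h1 : e.2 = 1
      · by_cases h2 : ov - 1 = 0
        · simp [pvCand, pvDelta, h1, h2, ih]
          exact cand_congr Q (by omega)
        · simp [pvCand, pvDelta, h1, h2, ih]
          exact cand_congr Q (by ring)
      · simp [pvCand, pvDelta, h0, h1, ih]

lemma all_end_delta {Q : List (Int × Int)} (h : ∀ e ∈ Q, e.2 = 1) :
    pvDelta Q = -(Q.length : Int) := by
  induction Q with
  | nil => simp [pvDelta]
  | cons e es ih =>
    have he := h e (by simp)
    simp [pvDelta, he, ih (fun x hx => h x (by simp [hx]))]

lemma pointwise_of_countP_le {l : List (Int × Int)} {p q : Int × Int → Bool}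
    (hqp : ∀ a ∈ l, q a = true → p a = true)
    (hle : l.countP p ≤ l.countP q) :
    ∀ a ∈ l, p a = true → q a = true := by
  induction l with
  | nil => simp
  | cons a l ih =>
    have hmono : l.countP q ≤ l.countP p :=
      List.countP_mono_left (fun x hx => hqp x (by simp [hx]))
    simp only [List.countP_cons] at hle
    have htail : l.countP p ≤ l.countP q ∧ (p a = true → q a = true) := by
      by_cases hqa : q a = true
      · have hpa := hqp a (by simp) hqa
        exact ⟨by simp [hpa, hqa] at hle; omega, fun _ => hqa⟩
      · by_cases hpa : p a = true
        · exfalso; simp [hpa, hqa] at hle; omega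
        · exact ⟨by simp [hpa, hqa] at hle; omega, fun h => absurd h hpa⟩
    intro b hb hpb
    rw [List.mem_cons] at hb
    rcases hb with rfl | hb
    · exact htail.2 hpb
    · exact ih (fun x hx => hqp x (by simp [hx])) htail.1 b hb hpb

-- ---- the counting facts about a sorted event list of a cluster ----

lemma mem_evs_tag {e : Int × Int} {C : List (Int × Int)} (h : e ∈ pvEvs C) :
    e.2 = 0 ∨ e.2 = 1 := by
  rcases mem_evs_iff.mp h with ⟨p, _, rfl | rfl⟩ <;> simp

-- counting helpers: events of C counted through a coordinate threshold
lemma countP_startLe (C : List (Int × Int)) (x : Int) :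
    (pvEvs C).countP (fun e => e.2 == 0 && decide (e.1 ≤ x))
      = C.countP (fun p => decide (p.1 ≤ x)) := by
  rw [countP_evs]; simp

lemma countP_endLe (C : List (Int × Int)) (x : Int) :
    (pvEvs C).countP (fun e => e.2 == 1 && decide (e.1 ≤ x))
      = C.countP (fun p => decide (p.2 ≤ x)) := by
  rw [countP_evs]; simp

lemma countP_startLt (C : List (Int × Int)) (x : Int) :
    (pvEvs C).countP (fun e => e.2 == 0 && decide (e.1 < x))
      = C.countP (fun p => decide (p.1 < x)) := by
  rw [countP_evs]; simp

lemma countP_endLt (C : List (Int × Int)) (x : Int) :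
    (pvEvs C).countP (fun e => e.2 == 1 && decide (e.1 < x))
      = C.countP (fun p => decide (p.2 < x)) := by
  rw [countP_evs]; simp

-- F0: every proper prefix of the sorted event list has a nonnegative counter
lemma delta_prefix_nonneg {C es P : List (Int × Int)} {q : Int × Int} {Q' : List (Int × Int)}
    (hlr : ∀ p ∈ C, p.1 ≤ p.2)
    (hperm : es.Perm (pvEvs C)) (hsort : es.Pairwise Le2)
    (hsplit : es = P ++ q :: Q') : 0 ≤ pvDelta P := by
  subst hsplit
  have hperm' := hperm.symm
  rcases List.pairwise_append.mp hsort with ⟨hP, hQ, hPQ⟩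
  have hqQ : ∀ b ∈ Q', Le2 q b := by
    rcases hQ with _ | ⟨h1, _⟩; exact h1
  have htag : ∀ e ∈ P ++ q :: Q', e.2 = 0 ∨ e.2 = 1 :=
    fun e he => mem_evs_tag (hperm.subset he)
  rw [delta_eq_countP]
  rcases htag q (by simp) with hq2 | hq2
  · -- next event is a start: compare strictly below x := q.1
    set x := q.1 with hx
    have hendP : P.countP (fun e => e.2 == 1)
        = P.countP (fun e => e.2 == 1 && decide (e.1 < x)) := by
      refine (List.countP_congr ?_).symm
      intro a ha
      have hle : Le2 a q := hPQ a ha q (by simp)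
      constructor
      · intro h; simp at h; simp [h.1]
      · intro h; simp at h ⊢
        refine ⟨h, ?_⟩
        rcases hle with h1 | ⟨h1, h2⟩
        · exact h1
        · rw [h] at h2; omega
    have hstartQ : (q :: Q').countP (fun e => e.2 == 0 && decide (e.1 < x)) = 0 := by
      rw [List.countP_eq_zero]
      intro b hb
      rw [List.mem_cons] at hb
      rcases hb with rfl | hb
      · simp; intro _; omega
      · have := hqQ b hb
        rcases this with h1 | ⟨h1, h2⟩ <;> simp <;> intro _ <;> omega
    have e1 : (P ++ q :: Q').countP (fun e => e.2 == 0 && decide (e.1 < x))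
        = P.countP (fun e => e.2 == 0 && decide (e.1 < x)) := by
      rw [List.countP_append, hstartQ]; omega
    have hstartP : P.countP (fun e => e.2 == 0 && decide (e.1 < x))
        ≤ P.countP (fun e => e.2 == 0) :=
      List.countP_mono_left (by intro a _ h; simp at h; simp [h.1])
    have hendE : P.countP (fun e => e.2 == 1 && decide (e.1 < x))
        ≤ (P ++ q :: Q').countP (fun e => e.2 == 1 && decide (e.1 < x)) := by
      rw [List.countP_append]; omega
    have hcs := hperm'.countP_eq (fun e => e.2 == 0 && decide (e.1 < x))
    have hce := hperm'.countP_eq (fun e => e.2 == 1 && decide (e.1 < x))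
    rw [countP_startLt C x] at hcs
    rw [countP_endLt C x] at hce
    have hmono : C.countP (fun p => decide (p.2 < x)) ≤ C.countP (fun p => decide (p.1 < x)) :=
      List.countP_mono_left (by intro p hp h; simp at h ⊢; exact lt_of_le_of_lt (hlr p hp) h)
    omega
  · -- next event is an end: compare at or below x := q.1
    set x := q.1 with hx
    have hendP : P.countP (fun e => e.2 == 1)
        = P.countP (fun e => e.2 == 1 && decide (e.1 ≤ x)) := by
      refine (List.countP_congr ?_).symm
      intro a ha
      have hle : Le2 a q := hPQ a ha q (by simp)
      constructor
      · intro h; simp at h; simp [h.1]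
      · intro h; simp at h ⊢
        refine ⟨h, ?_⟩
        rcases hle with h1 | ⟨h1, h2⟩ <;> omega
    have hstartQ : (q :: Q').countP (fun e => e.2 == 0 && decide (e.1 ≤ x)) = 0 := by
      rw [List.countP_eq_zero]
      intro b hb
      rw [List.mem_cons] at hb
      rcases hb with rfl | hb
      · simp [hq2]
      · have := hqQ b hb
        rcases this with h1 | ⟨h1, h2⟩ <;> simp <;> intro hb2 <;> omega
    have e1 : (P ++ q :: Q').countP (fun e => e.2 == 0 && decide (e.1 ≤ x))
        = P.countP (fun e => e.2 == 0 && decide (e.1 ≤ x)) := by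
      rw [List.countP_append, hstartQ]; omega
    have hstartP : P.countP (fun e => e.2 == 0 && decide (e.1 ≤ x))
        ≤ P.countP (fun e => e.2 == 0) :=
      List.countP_mono_left (by intro a _ h; simp at h; simp [h.1])
    have hendE : P.countP (fun e => e.2 == 1 && decide (e.1 ≤ x))
        ≤ (P ++ q :: Q').countP (fun e => e.2 == 1 && decide (e.1 ≤ x)) := by
      rw [List.countP_append]; omega
    have hcs := hperm'.countP_eq (fun e => e.2 == 0 && decide (e.1 ≤ x))
    have hce := hperm'.countP_eq (fun e => e.2 == 1 && decide (e.1 ≤ x))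
    rw [countP_startLe C x] at hcs
    rw [countP_endLe C x] at hce
    have hmono : C.countP (fun p => decide (p.2 ≤ x)) ≤ C.countP (fun p => decide (p.1 ≤ x)) :=
      List.countP_mono_left (by intro p hp h; simp at h ⊢; exact le_trans (hlr p hp) h)
    omega

-- F1: the counter balances exactly at the cluster's final end event
lemma prefix_balanced {C es P : List (Int × Int)} {x E : Int} {Q' : List (Int × Int)}
    (hlr : ∀ p ∈ C, p.1 ≤ p.2)
    (hmax : ∀ p ∈ C, p.2 ≤ E)
    (hclose : ∀ z, (∃ p ∈ C, p.1 ≤ z) → (∀ p ∈ C, p.1 ≤ z → p.2 ≤ z) → E ≤ z)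
    (hperm : es.Perm (pvEvs C)) (hsort : es.Pairwise Le2)
    (hsplit : es = P ++ (x, 1) :: Q') (hd : pvDelta P = 1) : x = E ∧ Q' = [] := by
  subst hsplit
  have hperm' := hperm.symm
  rcases List.pairwise_append.mp hsort with ⟨hP, hQ, hPQ⟩
  have hqQ : ∀ b ∈ Q', Le2 (x, 1) b := by
    rcases hQ with _ | ⟨h1, _⟩; exact h1
  have htag : ∀ e ∈ P ++ (x, 1) :: Q', e.2 = 0 ∨ e.2 = 1 :=
    fun e he => mem_evs_tag (hperm.subset he)
  -- starts in P are exactly the starts at coordinate ≤ x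
  have hstartP : P.countP (fun e => e.2 == 0)
      = P.countP (fun e => e.2 == 0 && decide (e.1 ≤ x)) := by
    refine (List.countP_congr ?_).symm
    intro a ha
    have hle : Le2 a (x, 1) := hPQ a ha (x, 1) (by simp)
    constructor
    · intro h; simp at h; simp [h.1]
    · intro h; simp at h ⊢
      refine ⟨h, ?_⟩
      rcases hle with h1 | ⟨h1, h2⟩ <;> simp at h1 <;> omega
  have hendP : P.countP (fun e => e.2 == 1)
      = P.countP (fun e => e.2 == 1 && decide (e.1 ≤ x)) := by
    refine (List.countP_congr ?_).symm
    intro a ha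
    have hle : Le2 a (x, 1) := hPQ a ha (x, 1) (by simp)
    constructor
    · intro h; simp at h; simp [h.1]
    · intro h; simp at h ⊢
      refine ⟨h, ?_⟩
      rcases hle with h1 | ⟨h1, h2⟩ <;> simp at h1 <;> omega
  have hstartQ : ((x, 1) :: Q').countP (fun e => e.2 == 0 && decide (e.1 ≤ x)) = 0 := by
    rw [List.countP_eq_zero]
    intro b hb
    rw [List.mem_cons] at hb
    rcases hb with rfl | hb
    · simp
    · have := hqQ b hb
      rcases this with h1 | ⟨h1, h2⟩ <;> simp at h1 ⊢ <;> intro _ <;> omega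
  have hendQ : 1 ≤ ((x, 1) :: Q').countP (fun e => e.2 == 1 && decide (e.1 ≤ x)) := by
    rw [List.countP_cons]
    simp
  have hcs := hperm'.countP_eq (fun e => e.2 == 0 && decide (e.1 ≤ x))
  have hce := hperm'.countP_eq (fun e => e.2 == 1 && decide (e.1 ≤ x))
  rw [countP_startLe C x] at hcs
  rw [countP_endLe C x] at hce
  rw [List.countP_append] at hcs hce
  have hmono : C.countP (fun p => decide (p.2 ≤ x)) ≤ C.countP (fun p => decide (p.1 ≤ x)) :=
    List.countP_mono_left (by intro p hp h; simp at h ⊢; exact le_trans (hlr p hp) h)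
  rw [delta_eq_countP] at hd
  -- the start/end counts at coordinate ≤ x agree on C
  have hcnt : C.countP (fun p => decide (p.1 ≤ x)) ≤ C.countP (fun p => decide (p.2 ≤ x)) := by
    omega
  have hcl : ∀ p ∈ C, decide (p.1 ≤ x) = true → decide (p.2 ≤ x) = true :=
    pointwise_of_countP_le
      (by intro p hp h; simp at h ⊢; exact le_trans (hlr p hp) h) hcnt
  have hclx : ∀ p ∈ C, p.1 ≤ x → p.2 ≤ x := by
    intro p hp h; simpa using hcl p hp (by simpa using h)
  -- the end event (x,1) belongs to some interval, so x is a real end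
  have hxev : (x, 1) ∈ pvEvs C := hperm.subset (by simp)
  rcases mem_evs_iff.mp hxev with ⟨p, hp, hpe | hpe⟩
  · exfalso; exact absurd hpe (by simp)
  · have hpx : p.2 = x := by
      have h := congrArg Prod.fst hpe
      simpa using h.symm
    have hEx : E ≤ x := hclose x ⟨p, hp, le_trans (hlr p hp) (le_of_eq hpx)⟩ hclx
    have hxE : x = E := le_antisymm (hpx ▸ hmax p hp) hEx
    refine ⟨hxE, ?_⟩
    -- everything after the balanced end event would be a further (E,1): impossible
    have hall : ∀ e ∈ Q', e.2 = 1 := by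
      intro e he
      have hle := hqQ e he
      have hev : e ∈ pvEvs C := hperm.subset (by simp [he])
      have hco : e.1 ≤ E := by
        rcases mem_evs_iff.mp hev with ⟨r, hr, rfl | rfl⟩
        · exact le_trans (hlr r hr) (hmax r hr)
        · exact hmax r hr
      rcases htag e (by simp [he]) with ht | ht
      · exfalso
        rcases hle with h1 | ⟨h1, h2⟩ <;> omega
      · exact ht
    have hdq : pvDelta Q' = -(Q'.length : Int) := all_end_delta hall
    have h0 : pvDelta (P ++ (x, 1) :: Q') = 0 := by
      rw [delta_perm hperm, delta_evs]
    rw [delta_append] at h0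
    rw [delta_eq_countP P] at h0
    simp only [pvDelta] at h0
    have : (Q'.length : Int) = 0 := by simp at h0; omega
    exact List.length_eq_zero_iff.mp (by omega)

-- the sorted event list of one cluster yields exactly one candidate: its end
lemma cand_cluster {C es : List (Int × Int)} {E : Int}
    (hne : C ≠ [])
    (hlr : ∀ p ∈ C, p.1 ≤ p.2)
    (hmax : ∀ p ∈ C, p.2 ≤ E)
    (hclose : ∀ z, (∃ p ∈ C, p.1 ≤ z) → (∀ p ∈ C, p.1 ≤ z → p.2 ≤ z) → E ≤ z)
    (hperm : es.Perm (pvEvs C)) (hsort : es.Pairwise Le2) :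
    pvCand es 0 = [E] := by
  have h0 : pvDelta es = 0 := by rw [delta_perm hperm, delta_evs]
  have hsuf : ∀ (Q P : List (Int × Int)), es = P ++ Q →
      pvCand Q (pvDelta P) = if Q = [] then [] else [E] := by
    intro Q
    induction Q with
    | nil => intro P h; simp [pvCand]
    | cons q Q' ih =>
      intro P hPQ
      have htagq : q.2 = 0 ∨ q.2 = 1 := mem_evs_tag (hperm.subset (by rw [hPQ]; simp))
      rcases htagq with ht | ht
      · -- a start event: the counter only grows
        have hstep : pvCand (q :: Q') (pvDelta P) = pvCand Q' (pvDelta (P ++ [q])) := by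
          rw [delta_append]
          simp [pvCand, ht, pvDelta]
        rw [hstep, ih (P ++ [q]) (by rw [hPQ]; simp)]
        have hQ' : Q' ≠ [] := by
          intro hnil; subst hnil
          have hge := delta_prefix_nonneg hlr hperm hsort hPQ
          rw [hPQ, delta_append] at h0
          simp [pvDelta, ht] at h0
          omega
        simp [hQ']
      · by_cases hz : pvDelta P - 1 = 0
        · -- the counter balances: this is the final end event (q.1 = E, nothing follows)
          have hq : q = (q.1, 1) := by rw [← ht]
          obtain ⟨hxE, hQnil⟩ :=
            prefix_balanced hlr hmax hclose hperm hsort (by rw [hPQ, hq]) (by omega)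
          subst hQnil
          simp [pvCand, ht, hz, hxE]
        · -- an inner end event: the counter stays positive
          have hstep : pvCand (q :: Q') (pvDelta P) = pvCand Q' (pvDelta (P ++ [q])) := by
            rw [delta_append]
            simp [pvCand, ht, hz, pvDelta]
            exact cand_congr Q' (by omega)
          rw [hstep, ih (P ++ [q]) (by rw [hPQ]; simp)]
          have hQ' : Q' ≠ [] := by
            intro hnil; subst hnil
            rw [hPQ, delta_append] at h0
            simp [pvDelta, ht] at h0
            omega
          simp [hQ']
  have hlen : es ≠ [] := by
    intro hnil
    have := hperm.length_eq
    rw [hnil] at this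
    rcases C with _ | ⟨p, C'⟩
    · exact hne rfl
    · simp [pvEvs] at this
  have := hsuf es [] (by simp)
  simpa [pvDelta, hlen] using this

-- ---- cluster split facts ----
lemma splitCl_append (S : List (Int × Int)) (ce : Int) :
    S = (pvSplitCl S ce).1 ++ (pvSplitCl S ce).2.2 := by
  induction S generalizing ce with
  | nil => simp [pvSplitCl]
  | cons p rest ih =>
    by_cases h : p.1 ≤ ce
    · simp only [pvSplitCl, if_pos h]; simpa using ih (max ce p.2)
    · simp [pvSplitCl, if_neg h]

lemma splitCl_ce_le (S : List (Int × Int)) (ce : Int) : ce ≤ (pvSplitCl S ce).2.1 := by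
  induction S generalizing ce with
  | nil => simp [pvSplitCl]
  | cons p rest ih =>
    by_cases h : p.1 ≤ ce
    · simp only [pvSplitCl, if_pos h]
      exact le_trans (le_max_left _ _) (ih (max ce p.2))
    · simp [pvSplitCl, if_neg h]

lemma splitCl_end_le (S : List (Int × Int)) (ce : Int) :
    ∀ p ∈ (pvSplitCl S ce).1, p.2 ≤ (pvSplitCl S ce).2.1 := by
  induction S generalizing ce with
  | nil => simp [pvSplitCl]
  | cons p rest ih =>
    by_cases h : p.1 ≤ ce
    · simp only [pvSplitCl, if_pos h]
      intro q hq
      rw [List.mem_cons] at hq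
      rcases hq with rfl | hq
      · exact le_trans (le_max_right _ _) (splitCl_ce_le rest _)
      · exact ih (max ce p.2) q hq
    · simp [pvSplitCl, if_neg h]

lemma splitCl_rest_gt (S : List (Int × Int)) (ce : Int)
    (hs : S.Pairwise (fun a b => a.1 ≤ b.1)) :
    ∀ p ∈ (pvSplitCl S ce).2.2, (pvSplitCl S ce).2.1 < p.1 := by
  induction S generalizing ce with
  | nil => simp [pvSplitCl]
  | cons p rest ih =>
    rcases hs with _ | ⟨hp, hrest⟩
    by_cases h : p.1 ≤ ce
    · simp only [pvSplitCl, if_pos h]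
      exact ih (max ce p.2) hrest
    · simp only [pvSplitCl, if_neg h]
      intro q hq
      rw [List.mem_cons] at hq
      rcases hq with rfl | hq
      · omega
      · exact lt_of_lt_of_le (by omega) (hp q hq)

lemma splitCl_close (S : List (Int × Int)) (ce : Int) (z : Int)
    (hcl : ∀ p ∈ (pvSplitCl S ce).1, p.1 ≤ z → p.2 ≤ z) (hce : ce ≤ z) :
    (pvSplitCl S ce).2.1 ≤ z := by
  induction S generalizing ce with
  | nil => simpa [pvSplitCl] using hce
  | cons p rest ih =>
    by_cases h : p.1 ≤ ce
    · simp only [pvSplitCl, if_pos h] at hcl ⊢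
      have hp2 : p.2 ≤ z := hcl p (by simp) (le_trans h hce)
      exact ih (max ce p.2) (fun q hq => hcl q (by simp [hq])) (by omega)
    · simpa [pvSplitCl, if_neg h] using hce

lemma mergeRec_splitCl (S : List (Int × Int)) (cl ce : Int) :
    pvMergeRec S cl ce
      = (cl, (pvSplitCl S ce).2.1)
        :: (match (pvSplitCl S ce).2.2 with
            | [] => []
            | p :: R' => pvMergeRec R' p.1 p.2) := by
  induction S generalizing ce with
  | nil => simp [pvMergeRec, pvSplitCl]
  | cons p rest ih =>
    by_cases h : p.1 ≤ ce
    · simp only [pvMergeRec, pvSplitCl, if_pos h]; exact ih (max ce p.2)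
    · simp [pvMergeRec, pvSplitCl, if_neg h]

-- ---- bridges between the ports and the proof-layer functions ----
lemma scanA_eq_cand (es : List (Int × Int)) (ov mx : Int) :
    pvScanA es ov mx = ((pvCand es ov).find? (fun x => decide (x + 1 ≤ mx))).map (· + 1) := by
  induction es generalizing ov with
  | nil => simp [pvScanA, pvCand]
  | cons e es ih =>
    by_cases h0 : e.2 = 0
    · simp [pvScanA, pvCand, h0, ih]
    · by_cases h1 : e.2 = 1
      · by_cases h2 : ov - 1 = 0
        · by_cases h3 : e.1 + 1 ≤ mx
          · simp [pvScanA, pvCand, h0, h1, h2, h3, ih]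
            exact Or.inl (by omega)
          · simp [pvScanA, pvCand, h1, h2, h3, ih]
            have hn : (e.1 :: pvCand es 0).find? (fun x => decide (x < mx))
                = (pvCand es 0).find? (fun x => decide (x < mx)) :=
              List.find?_cons_of_neg (by simpa using h3)
            rw [hn]
        · simp [pvScanA, pvCand, h0, h1, h2, ih]
      · simp [pvScanA, pvCand, h0, h1, ih]

lemma firstGap_eq_find (cl : List (Int × Int)) (mx : Int) :
    pvFirstGap cl mx = ((cl.map (fun c => c.2)).find? (fun x => decide (x + 1 ≤ mx))).map (· + 1) := by
  induction cl with
  | nil => simp [pvFirstGap]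
  | cons c cl ih =>
    by_cases h : c.2 + 1 ≤ mx
    · simp [pvFirstGap, h, ih]
      exact Or.inl (by omega)
    · simp [pvFirstGap, h, ih]
      have hn : (c.2 :: List.map (fun c => c.2) cl).find? (fun x => decide (x < mx))
          = (List.map (fun c => c.2) cl).find? (fun x => decide (x < mx)) :=
        List.find?_cons_of_neg (by simpa using h)
      rw [hn]
      simp [List.find?_map, Function.comp]

lemma mergeLoop_eq_rec (rest : List (Int × Int)) (acc : List (Int × Int)) (cl ce : Int) :
    (fun st => st.1 ++ [(st.2.1, st.2.2)])
      (rest.foldl (fun st p =>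
          if p.1 ≤ st.2.2 then (st.1, st.2.1, max st.2.2 p.2)
          else (st.1 ++ [(st.2.1, st.2.2)], p.1, p.2)) (acc, cl, ce))
      = acc ++ pvMergeRec rest cl ce := by
  induction rest generalizing acc cl ce with
  | nil => simp [pvMergeRec]
  | cons p rest ih =>
    by_cases h : p.1 ≤ ce
    · simp only [List.foldl_cons, if_pos h, pvMergeRec, ih]
    · simp only [List.foldl_cons, if_neg h, pvMergeRec, if_neg h, ih, List.append_assoc,
        List.cons_append, List.nil_append]

-- the raw event list A builds is exactly the events of the raw interval list B builds
lemma rawA_eq_evs_rawB (sensors : List (Int × Int × Int)) (y : Int)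
    (accA accB : List (Int × Int)) (h : accA = pvEvs accB) :
    sensors.foldl (fun coords s =>
        let dy := |s.2.1 - y|
        if dy ≤ s.2.2 then coords ++ [(s.1 + dy - s.2.2, 0), (s.2.2 - dy + s.1, 1)]
        else coords) accA
      = pvEvs (sensors.foldl (fun intervals s =>
          let dy := |s.2.1 - y|
          if dy ≤ s.2.2 then intervals ++ [(s.1 + dy - s.2.2, s.2.2 - dy + s.1)]
          else intervals) accB) := by
  induction sensors generalizing accA accB with
  | nil => exact h
  | cons s ss ih =>
    simp only [List.foldl_cons]
    refine ih _ _ ?_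
    by_cases hc : |s.2.1 - y| ≤ s.2.2 <;>
      simp [hc, h, evs_append, pvEvs]

lemma le2_fst {a b : Int × Int} (h : Le2 a b) : a.1 ≤ b.1 := by
  rcases h with h | ⟨h, _⟩ <;> omega

-- main lemma: A's candidates on the sorted events = the ends of B's merged clusters
lemma main_cand : ∀ (n : Nat) (S' : List (Int × Int)) (l0 r0 : Int) (es : List (Int × Int)),
    S'.length ≤ n →
    (∀ p ∈ (l0, r0) :: S', p.1 ≤ p.2) →
    ((l0, r0) :: S').Pairwise (fun a b => a.1 ≤ b.1) →
    es.Perm (pvEvs ((l0, r0) :: S')) → es.Pairwise Le2 →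
    pvCand es 0 = (pvMergeRec S' l0 r0).map (fun c => c.2) := by
  intro n
  induction n with
  | zero =>
    intro S' l0 r0 es hlen hlr hs hperm hsort
    have hS' : S' = [] := List.eq_nil_of_length_eq_zero (by omega)
    subst hS'
    rw [pvMergeRec]
    refine cand_cluster (C := [(l0, r0)]) (E := r0) (by simp) hlr (by simp) ?_ hperm hsort
    intro z ⟨p, hp, hpz⟩ hcl
    simp at hp
    subst hp
    exact hcl (l0, r0) (by simp) hpz
  | succ n ih =>
    intro S' l0 r0 es hlen hlr hs hperm hsort
    have hsS' : S'.Pairwise (fun a b => a.1 ≤ b.1) := (List.pairwise_cons.mp hs).2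
    have hhead : ∀ b ∈ S', l0 ≤ b.1 := fun b hb => (List.pairwise_cons.mp hs).1 b hb
    obtain ⟨T, E, R, hsplit⟩ :
        ∃ T E R, pvSplitCl S' r0 = (T, E, R) := ⟨_, _, _, rfl⟩
    have hTR : S' = T ++ R := by
      have := splitCl_append S' r0; rw [hsplit] at this; exact this
    have hceE : r0 ≤ E := by have := splitCl_ce_le S' r0; rw [hsplit] at this; exact this
    have hTend : ∀ p ∈ T, p.2 ≤ E := by
      have := splitCl_end_le S' r0; rw [hsplit] at this; exact this
    have hRgt : ∀ p ∈ R, E < p.1 := by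
      have := splitCl_rest_gt S' r0 hsS'; rw [hsplit] at this; exact this
    -- the first cluster C and its facts
    have hCsub : ((l0, r0) :: T).Sublist ((l0, r0) :: S') := by
      rw [hTR]; exact List.Sublist.cons₂ _ (List.sublist_append_left T R)
    have hRsub : R.Sublist ((l0, r0) :: S') := by
      rw [hTR]
      exact List.Sublist.trans (List.sublist_append_right T R) (List.sublist_cons_self _ _)
    have hlrC : ∀ p ∈ (l0, r0) :: T, p.1 ≤ p.2 := fun p hp => hlr p (hCsub.subset hp)
    have hlrR : ∀ p ∈ R, p.1 ≤ p.2 := fun p hp => hlr p (hRsub.subset hp)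
    have hmaxC : ∀ p ∈ (l0, r0) :: T, p.2 ≤ E := by
      intro p hp
      rw [List.mem_cons] at hp
      rcases hp with rfl | hp
      · exact hceE
      · exact hTend p hp
    have hcloseC : ∀ z, (∃ p ∈ (l0, r0) :: T, p.1 ≤ z) →
        (∀ p ∈ (l0, r0) :: T, p.1 ≤ z → p.2 ≤ z) → E ≤ z := by
      intro z ⟨p, hp, hpz⟩ hcl
      have hl0 : l0 ≤ z := by
        rw [List.mem_cons] at hp
        rcases hp with rfl | hp
        · exact hpz
        · exact le_trans (hhead p (hTR ▸ List.mem_append_left R hp)) hpz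
      have hr0 : r0 ≤ z := hcl (l0, r0) (by simp) hl0
      have := splitCl_close S' r0 z ?_ hr0
      · rw [hsplit] at this; exact this
      · rw [hsplit]
        intro q hq
        exact hcl q (by simp [hq])
    -- split the sorted events at the cluster boundary
    have hevsplit : pvEvs ((l0, r0) :: S') = pvEvs ((l0, r0) :: T) ++ pvEvs R := by
      rw [hTR]
      simp [pvEvs]
    set esC := PySem.List.sorted2 (pvEvs ((l0, r0) :: T)) (fun p => p.1) (fun p => p.2) false
      with hesC
    set esR := PySem.List.sorted2 (pvEvs R) (fun p => p.1) (fun p => p.2) false with hesR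
    have hpC : esC.Perm (pvEvs ((l0, r0) :: T)) := PySem.List.sorted2_perm _ _ _ _
    have hpR : esR.Perm (pvEvs R) := PySem.List.sorted2_perm _ _ _ _
    have hCco : ∀ e ∈ esC, e.1 ≤ E := by
      intro e he
      rcases mem_evs_iff.mp (hpC.subset he) with ⟨p, hp, rfl | rfl⟩
      · exact le_trans (hlrC p hp) (hmaxC p hp)
      · exact hmaxC p hp
    have hRco : ∀ e ∈ esR, E < e.1 := by
      intro e he
      rcases mem_evs_iff.mp (hpR.subset he) with ⟨p, hp, rfl | rfl⟩
      · exact hRgt p hp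
      · exact lt_of_lt_of_le (hRgt p hp) (hlrR p hp)
    have hes : es = esC ++ esR := by
      refine List.Perm.eq_of_pairwise (fun a b _ _ h1 h2 => le2_antisymm h1 h2) hsort ?_ ?_
      · rw [List.pairwise_append]
        refine ⟨sorted2_pairwise' _, sorted2_pairwise' _, ?_⟩
        intro a ha b hb
        exact Or.inl (lt_of_le_of_lt (hCco a ha) (hRco b hb))
      · rw [hevsplit] at hperm
        exact hperm.trans (hpC.append hpR).symm
    rw [hes, cand_append]
    have hdC : pvDelta esC = 0 := by rw [delta_perm hpC, delta_evs]
    rw [hdC]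
    have hcandC : pvCand esC 0 = [E] :=
      cand_cluster (by simp) hlrC hmaxC hcloseC hpC (sorted2_pairwise' _)
    -- right half: either nothing remains, or recurse on the next cluster
    rcases hR0 : R with _ | ⟨p1, R'⟩
    · subst hR0
      have hEnil : esR = [] := by
        have := hpR.length_eq; simp [pvEvs] at this; exact this
      rw [mergeRec_splitCl S' l0 r0, hsplit, hEnil]
      simp [pvCand, hcandC]
    · subst hR0
      have hlenR : R'.length ≤ n := by
        have : S'.length = T.length + (R'.length + 1) := by rw [hTR]; simp
        omega
      have hlrR' : ∀ p ∈ p1 :: R', p.1 ≤ p.2 := hlrR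
      have hsR : (p1 :: R').Pairwise (fun a b => a.1 ≤ b.1) := hsS'.sublist (by
        rw [hTR]; exact List.sublist_append_right T _)
      have hcandR : pvCand esR 0 = (pvMergeRec R' p1.1 p1.2).map (fun c => c.2) := by
        refine ih R' p1.1 p1.2 esR hlenR ?_ ?_ ?_ (sorted2_pairwise' _)
        · simpa using hlrR'
        · simpa using hsR
        · simpa using hpR
      rw [mergeRec_splitCl S' l0 r0, hsplit]
      simp [pvCand, hcandC, hcandR, zero_add]

-- head of the sorted event list is (l0, 0)
lemma sorted_evs_head {S' : List (Int × Int)} {l0 r0 : Int} {es : List (Int × Int)}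
    (hlr : ∀ p ∈ (l0, r0) :: S', p.1 ≤ p.2)
    (hs : ((l0, r0) :: S').Pairwise (fun a b => a.1 ≤ b.1))
    (hperm : es.Perm (pvEvs ((l0, r0) :: S'))) (hsort : es.Pairwise Le2) :
    ∃ tl, es = (l0, 0) :: tl := by
  rcases hes : es with _ | ⟨h, tl⟩
  · exfalso
    have := hperm.length_eq
    rw [hes] at this
    simp [pvEvs] at this
  · refine ⟨tl, ?_⟩
    have hmem : (l0, 0) ∈ es := hperm.mem_iff.mpr (by simp [pvEvs])
    rw [hes] at hmem
    rw [List.mem_cons] at hmem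
    rcases hmem with heq | hmem
    · rw [heq]
    · -- h is Le2-below (l0,0) yet every event is ≥ (l0,0): h = (l0,0)
      have hle : Le2 h (l0, 0) := by
        rw [hes] at hsort
        exact (List.pairwise_cons.mp hsort).1 _ hmem
      have hhe : h ∈ pvEvs ((l0, r0) :: S') := hperm.subset (by rw [hes]; simp)
      have hploc : ∀ p ∈ (l0, r0) :: S', l0 ≤ p.1 := by
        intro p hp
        rw [List.mem_cons] at hp
        rcases hp with rfl | hp
        · simp
        · exact (List.pairwise_cons.mp hs).1 p hp
      have hco : l0 ≤ h.1 := by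
        rcases mem_evs_iff.mp hhe with ⟨p, hp, rfl | rfl⟩
        · exact hploc p hp
        · exact le_trans (hploc p hp) (hlr p hp)
      have htg : h.2 = 0 ∨ h.2 = 1 := mem_evs_tag hhe
      have : h = (l0, 0) := by
        rcases hle with h1 | ⟨h1, h2⟩
        · exfalso; simp at h1; omega
        · simp at h1 h2
          rcases h with ⟨ha, hb⟩
          simp at h1 h2 hco htg ⊢
          omega
      rw [this]

-- members of Source B's raw interval list satisfy left ≤ right
lemma rawB_lr (sensors : List (Int × Int × Int)) (y : Int) (acc : List (Int × Int))
    (hacc : ∀ p ∈ acc, p.1 ≤ p.2) :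
    ∀ p ∈ sensors.foldl (fun intervals s =>
        let dy := |s.2.1 - y|
        if dy ≤ s.2.2 then intervals ++ [(s.1 + dy - s.2.2, s.2.2 - dy + s.1)]
        else intervals) acc, p.1 ≤ p.2 := by
  induction sensors generalizing acc with
  | nil => exact hacc
  | cons s ss ih =>
    simp only [List.foldl_cons]
    refine ih _ ?_
    intro p hp
    by_cases hc : |s.2.1 - y| ≤ s.2.2
    · simp only [hc, if_pos, List.mem_append, List.mem_singleton] at hp
      rcases hp with hp | hp
      · exact hacc p hp
      · subst hp; simp; omega
    · simp only [hc, if_neg, not_false_iff] at hp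
      exact hacc p hp

-- ===== VERDICT (by name: the statement is the Claim_ definition above) =====
theorem get_free_x_in_row_spec : Claim_equal_get_free_x_in_row := by
  intro sensors y max_x _dom
  unfold Spec_get_free_x_in_row get_free_x_in_row get_free_x_in_row_alt pvGenCoords pvIntervals
  set rawB := sensors.foldl (fun intervals s =>
      let dy := |s.2.1 - y|
      if dy ≤ s.2.2 then intervals ++ [(s.1 + dy - s.2.2, s.2.2 - dy + s.1)]
      else intervals) ([] : List (Int × Int)) with hrawB
  have hraw : sensors.foldl (fun coords s =>
      let dy := |s.2.1 - y|
      if dy ≤ s.2.2 then coords ++ [(s.1 + dy - s.2.2, 0), (s.2.2 - dy + s.1, 1)]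
      else coords) ([] : List (Int × Int)) = pvEvs rawB :=
    rawA_eq_evs_rawB sensors y [] [] rfl
  rw [hraw]
  set S := PySem.List.sorted2 rawB (fun p => p.1) (fun p => p.2) false with hS
  have hlrRaw : ∀ p ∈ rawB, p.1 ≤ p.2 := rawB_lr sensors y [] (by simp)
  have hSperm : S.Perm rawB := PySem.List.sorted2_perm _ _ _ _
  have hSsort : S.Pairwise Le2 := sorted2_pairwise' rawB
  have hlrS : ∀ p ∈ S, p.1 ≤ p.2 := fun p hp => hlrRaw p (hSperm.subset hp)
  have hfstS : S.Pairwise (fun a b => a.1 ≤ b.1) := hSsort.imp le2_fst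
  have hcoords : PySem.List.sorted2 (pvEvs rawB) (fun c => c.1) (fun c => c.2) false
      = PySem.List.sorted2 (pvEvs S) (fun c => c.1) (fun c => c.2) false := by
    refine (sorted2_unique ?_ (sorted2_pairwise' _)).symm.symm
    exact (PySem.List.sorted2_perm _ _ _ _).trans
      (List.Perm.flatMap_right _ hSperm)
  rw [hcoords]
  clear_value S
  clear hS hrawB hraw hcoords
  rcases S with _ | ⟨⟨l0, r0⟩, S'⟩
  · rfl
  · have hperm' : (PySem.List.sorted2 (pvEvs ((l0, r0) :: S')) (fun c => c.1) (fun c => c.2)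
        false).Perm (pvEvs ((l0, r0) :: S')) := PySem.List.sorted2_perm _ _ _ _
    have hsort' := sorted2_pairwise' (pvEvs ((l0, r0) :: S'))
    obtain ⟨tl, htl⟩ := sorted_evs_head hlrS hfstS hperm' hsort'
    rw [htl]
    dsimp only
    by_cases hge : l0 - 1 ≥ 0
    · rw [if_pos hge, if_pos hge]
    · rw [if_neg hge, if_neg hge]
      have hB : ((S'.foldl (fun st p =>
            if p.1 ≤ st.2.2 then (st.1, st.2.1, max st.2.2 p.2)
            else (st.1 ++ [(st.2.1, st.2.2)], p.1, p.2))
            (([] : List (Int × Int)), l0, r0)).1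
          ++ [((S'.foldl (fun st p =>
            if p.1 ≤ st.2.2 then (st.1, st.2.1, max st.2.2 p.2)
            else (st.1 ++ [(st.2.1, st.2.2)], p.1, p.2))
            (([] : List (Int × Int)), l0, r0)).2.1,
            (S'.foldl (fun st p =>
            if p.1 ≤ st.2.2 then (st.1, st.2.1, max st.2.2 p.2)
            else (st.1 ++ [(st.2.1, st.2.2)], p.1, p.2))
            (([] : List (Int × Int)), l0, r0)).2.2)])
          = pvMergeRec S' l0 r0 := by
        simpa using mergeLoop_eq_rec S' [] l0 r0
      rw [hB, firstGap_eq_find, ← htl, scanA_eq_cand,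
        main_cand S'.length S' l0 r0 _ le_rfl hlrS hfstS hperm' hsort']
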